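-- pv_equiv track=rewrite | github.com/mr-mcox/snapwright | snapwright/evolution/translate.py | _eq_label
-- ===== SOURCE A (Python) =====
-- _STD_BAND_LABELS: dict[str, str] = {
--     "l": "low shelf", "1": "band 1", "2": "band 2",
--     "3": "band 3", "4": "band 4", "h": "high shelf",
-- }
--
-- _4BAND_LABELS: dict[str, str] = {
--     "l": "low shelf", "lm": "lo-mid", "hm": "hi-mid", "h": "high shelf",
-- }
--
-- _PULSAR_LABELS: dict[str, str] = {
--     "eq1": "section 1 on", "1lb": "lo boost", "1latt": "lo atten",
--     "1lf": "lo freq", "1hw": "hi width", "1hb": "hi boost",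
--     "1hf": "hi freq", "1hatt": "hi atten", "1hattf": "hi atten freq",
--     "eq5": "section 5 on", "5lb": "lo boost", "5lf": "lo freq",
--     "5md": "mid depth", "5mf": "mid freq", "5hb": "hi boost", "5hf": "hi freq",
-- }
--
-- def _eq_label(key: str, model: str) -> str:
--     """Translate an EQ parameter key to a human label given the model."""
--     suffix_map = {"g": "gain", "f": "freq", "q": "Q", "t": "type", "eq": "shelf type"}
--
--     if model == "PULSAR":
--         return _PULSAR_LABELS.get(key, key)
--
--     if model in ("SOUL", "E88"):
--         for band_key, band_label in _4BAND_LABELS.items():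
--             for sfx, sfx_label in suffix_map.items():
--                 if key == f"{band_key}{sfx}":
--                     return f"{band_label} {sfx_label}"
--             # E88 extra: lt, ht (type)
--             if key in (f"{band_key}t",):
--                 return f"{band_label} type"
--         return key
--
--     # STD (default)
--     for band_key, band_label in _STD_BAND_LABELS.items():
--         for sfx, sfx_label in suffix_map.items():
--             if key == f"{band_key}{sfx}":
--                 return f"{band_label} {sfx_label}"
--     return key
-- ===== SOURCE B (Python) =====
-- _STD_BAND_LABELS = {
--     "l": "low shelf", "1": "band 1", "2": "band 2",
--     "3": "band 3", "4": "band 4", "h": "high shelf",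
-- }
--
-- _4BAND_LABELS = {
--     "l": "low shelf", "lm": "lo-mid", "hm": "hi-mid", "h": "high shelf",
-- }
--
-- _PULSAR_LABELS = {
--     "eq1": "section 1 on", "1lb": "lo boost", "1latt": "lo atten",
--     "1lf": "lo freq", "1hw": "hi width", "1hb": "hi boost",
--     "1hf": "hi freq", "1hatt": "hi atten", "1hattf": "hi atten freq",
--     "eq5": "section 5 on", "5lb": "lo boost", "5lf": "lo freq",
--     "5md": "mid depth", "5mf": "mid freq", "5hb": "hi boost", "5hf": "hi freq",
-- }
--
-- _SUFFIX_LABELS = {"eq": "shelf type", "g": "gain", "f": "freq", "q": "Q", "t": "type"}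
--
--
-- def _eq_label(key: str, model: str) -> str:
--     """Translate an EQ parameter key to a human label given the model."""
--     if model == "PULSAR":
--         return _PULSAR_LABELS.get(key, key)
--     bands = _4BAND_LABELS if model in ("SOUL", "E88") else _STD_BAND_LABELS
--     for sfx, sfx_label in _SUFFIX_LABELS.items():
--         if key.endswith(sfx):
--             band_label = bands.get(key[:-len(sfx)])
--             if band_label is not None:
--                 return f"{band_label} {sfx_label}"
--     return key
-- ===== Notes on version B (the rewrite author's own statement) =====
-- stated objective: simpler
-- what changed: Instead of A's nested loops that build and compare every band+suffix combination, B strips a known suffix off the key and does one dict lookup of the remaining band prefix per suffix.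
import Mathlib
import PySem

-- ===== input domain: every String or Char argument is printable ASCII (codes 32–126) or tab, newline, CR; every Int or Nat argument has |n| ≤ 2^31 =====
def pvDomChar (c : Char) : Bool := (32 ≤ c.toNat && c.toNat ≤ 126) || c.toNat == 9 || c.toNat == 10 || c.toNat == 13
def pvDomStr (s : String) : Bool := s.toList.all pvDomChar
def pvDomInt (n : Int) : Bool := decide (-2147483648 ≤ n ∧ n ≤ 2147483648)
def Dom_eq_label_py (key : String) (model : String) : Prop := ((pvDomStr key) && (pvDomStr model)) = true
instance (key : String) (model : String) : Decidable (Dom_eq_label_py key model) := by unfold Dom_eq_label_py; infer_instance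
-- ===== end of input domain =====

-- B replaces A's nested build-and-compare loops over band×suffix by a single suffix-strip pass with
-- one dict lookup per suffix (objective: simpler decomposition; same observable behaviour).

-- shared module-level tables (Python dict literals, as insertion-ordered association lists)
def stdBandLabels : List (String × String) := [("l", "low shelf"), ("1", "band 1"), ("2", "band 2"), ("3", "band 3"), ("4", "band 4"), ("h", "high shelf")]
def fourBandLabels : List (String × String) := [("l", "low shelf"), ("lm", "lo-mid"), ("hm", "hi-mid"), ("h", "high shelf")]
def pulsarLabels : List (String × String) := [("eq1", "section 1 on"), ("1lb", "lo boost"), ("1latt", "lo atten"), ("1lf", "lo freq"), ("1hw", "hi width"), ("1hb", "hi boost"), ("1hf", "hi freq"), ("1hatt", "hi atten"), ("1hattf", "hi atten freq"), ("eq5", "section 5 on"), ("5lb", "lo boost"), ("5lf", "lo freq"), ("5md", "mid depth"), ("5mf", "mid freq"), ("5hb", "hi boost"), ("5hf", "hi freq")]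

-- ===== PORT A =====
def suffixMapA : List (String × String) := [("g", "gain"), ("f", "freq"), ("q", "Q"), ("t", "type"), ("eq", "shelf type")]

def aSfxLoop (key band_key band_label : String) : List (String × String) → Option String
  | [] => none
  | (sfx, sfx_label) :: rest =>
      if key = band_key ++ sfx then some (band_label ++ " " ++ sfx_label)
      else aSfxLoop key band_key band_label rest

def aBandLoop4 (key : String) : List (String × String) → Option String
  | [] => none
  | (bk, bl) :: rest =>
      match aSfxLoop key bk bl suffixMapA with
      | some r => some r
      | none =>
          -- E88 extra: `if key in (f"{band_key}t",)`
          if key = bk ++ "t" then some (bl ++ " type") else aBandLoop4 key rest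

def aBandLoopStd (key : String) : List (String × String) → Option String
  | [] => none
  | (bk, bl) :: rest =>
      match aSfxLoop key bk bl suffixMapA with
      | some r => some r
      | none => aBandLoopStd key rest

def eq_label_py (key : String) (model : String) : String :=
  if model = "PULSAR" then (PySem.Dict.ofList pulsarLabels).getD key key
  else if model = "SOUL" ∨ model = "E88" then
    match aBandLoop4 key fourBandLabels with
    | some r => r
    | none => key
  else
    match aBandLoopStd key stdBandLabels with
    | some r => r
    | none => key

-- ===== PORT B =====
def suffixLabelsB : List (String × String) := [("eq", "shelf type"), ("g", "gain"), ("f", "freq"), ("q", "Q"), ("t", "type")]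

def bLoop (key : String) (bands : PySem.Dict String String) : List (String × String) → Option String
  | [] => none
  | (sfx, sfx_label) :: rest =>
      if PySem.Str.endswith key sfx then
        match bands.get? (PySem.Str.slice key none (some (-(sfx.length : Int)))) with
        | some band_label => some (band_label ++ " " ++ sfx_label)
        | none => bLoop key bands rest
      else bLoop key bands rest

def eq_label_py_alt (key : String) (model : String) : String :=
  if model = "PULSAR" then (PySem.Dict.ofList pulsarLabels).getD key key
  else
    let bands : PySem.Dict String String :=
      if model = "SOUL" ∨ model = "E88" then PySem.Dict.ofList fourBandLabels
      else PySem.Dict.ofList stdBandLabels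
    match bLoop key bands suffixLabelsB with
    | some r => r
    | none => key

-- ===== PRECONDITION & SPEC =====
def Spec_eq_label_py (key : String) (model : String) (out : String) : Prop := out = eq_label_py_alt key model
instance (key : String) (model : String) (out : String) : Decidable (Spec_eq_label_py key model out) := by unfold Spec_eq_label_py; infer_instance

-- ===== CLAIM (what is proved, stated in full; the proofs are below) =====
def Claim_equal_eq_label_py : Prop := ∀ (key : String) (model : String), Dom_eq_label_py key model → Spec_eq_label_py key model (eq_label_py key model)

-- ===== LEMMAS AND PROOFS =====

-- If key ends with sfx (sfx nonempty), then key = key[:-len(sfx)] ++ sfx.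
lemma endswith_decomp (key sfx : String) (hn : 0 < sfx.length)
    (h : PySem.Str.endswith key sfx = true) :
    key = PySem.Str.slice key none (some (-(sfx.length : Int))) ++ sfx := by
  obtain ⟨t, ht⟩ := (PySem.Chars.endswith_iff _ _).mp h
  have hlen : sfx.length = sfx.toList.length := rfl
  have hslice : (PySem.Str.slice key none (some (-(sfx.length : Int)))).toList = t := by
    unfold PySem.Str.slice
    rw [PySem.Chars.slice_eq_listSlice]
    rw [hlen, PySem.List.slice_to_neg_natCast _ _ (by omega)]
    have h1 : key.toList.length - sfx.toList.length = t.length := by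
      rw [← ht]; simp
    rw [h1, ← ht, List.take_left, String.toList_ofList]
  have : (PySem.Str.slice key none (some (-(sfx.length : Int))) ++ sfx).toList = key.toList := by
    rw [String.toList_append, hslice, ht]
  have h2 := congrArg String.ofList this
  simpa [String.ofList_toList] using h2.symm

lemma bLoop_skip {key sfx sfx_label : String} {d : PySem.Dict String String}
    {rest : List (String × String)}
    (h : PySem.Str.endswith key sfx = true →
         d.get? (PySem.Str.slice key none (some (-(sfx.length : Int)))) = none) :
    bLoop key d ((sfx, sfx_label) :: rest) = bLoop key d rest := by
  cases he : PySem.Str.endswith key sfx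
  · simp [bLoop, show PySem.Chars.endswith key.toList sfx.toList = false from he]
  · simp [bLoop, show PySem.Chars.endswith key.toList sfx.toList = true from he, h he]

lemma get?_none_stdBandLabels (p : String)
    (h0 : ¬ ("l" = p))
    (h1 : ¬ ("1" = p))
    (h2 : ¬ ("2" = p))
    (h3 : ¬ ("3" = p))
    (h4 : ¬ ("4" = p))
    (h5 : ¬ ("h" = p))
    : (PySem.Dict.mk stdBandLabels).get? p = none := by
  have b0 : ("l" == p) = false := by simpa using h0
  have b1 : ("1" == p) = false := by simpa using h1
  have b2 : ("2" == p) = false := by simpa using h2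
  have b3 : ("3" == p) = false := by simpa using h3
  have b4 : ("4" == p) = false := by simpa using h4
  have b5 : ("h" == p) = false := by simpa using h5
  simp [PySem.Dict.get?, stdBandLabels, List.find?, b0, b1, b2, b3, b4, b5]

lemma get?_none_fourBandLabels (p : String)
    (h0 : ¬ ("l" = p))
    (h1 : ¬ ("lm" = p))
    (h2 : ¬ ("hm" = p))
    (h3 : ¬ ("h" = p))
    : (PySem.Dict.mk fourBandLabels).get? p = none := by
  have b0 : ("l" == p) = false := by simpa using h0
  have b1 : ("lm" == p) = false := by simpa using h1
  have b2 : ("hm" == p) = false := by simpa using h2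
  have b3 : ("h" == p) = false := by simpa using h3
  simp [PySem.Dict.get?, fourBandLabels, List.find?, b0, b1, b2, b3]

lemma dictMk_std : PySem.Dict.ofList stdBandLabels = PySem.Dict.mk stdBandLabels := by decide
lemma dictMk_four : PySem.Dict.ofList fourBandLabels = PySem.Dict.mk fourBandLabels := by decide

lemma mainStd (key : String) :
    aBandLoopStd key stdBandLabels = bLoop key (PySem.Dict.mk stdBandLabels) suffixLabelsB := by
  by_cases h0 : key = "lg"
  · subst h0; decide
  by_cases h1 : key = "lf"
  · subst h1; decide
  by_cases h2 : key = "lq"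
  · subst h2; decide
  by_cases h3 : key = "lt"
  · subst h3; decide
  by_cases h4 : key = "leq"
  · subst h4; decide
  by_cases h5 : key = "1g"
  · subst h5; decide
  by_cases h6 : key = "1f"
  · subst h6; decide
  by_cases h7 : key = "1q"
  · subst h7; decide
  by_cases h8 : key = "1t"
  · subst h8; decide
  by_cases h9 : key = "1eq"
  · subst h9; decide
  by_cases h10 : key = "2g"
  · subst h10; decide
  by_cases h11 : key = "2f"
  · subst h11; decide
  by_cases h12 : key = "2q"
  · subst h12; decide
  by_cases h13 : key = "2t"
  · subst h13; decide
  by_cases h14 : key = "2eq"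
  · subst h14; decide
  by_cases h15 : key = "3g"
  · subst h15; decide
  by_cases h16 : key = "3f"
  · subst h16; decide
  by_cases h17 : key = "3q"
  · subst h17; decide
  by_cases h18 : key = "3t"
  · subst h18; decide
  by_cases h19 : key = "3eq"
  · subst h19; decide
  by_cases h20 : key = "4g"
  · subst h20; decide
  by_cases h21 : key = "4f"
  · subst h21; decide
  by_cases h22 : key = "4q"
  · subst h22; decide
  by_cases h23 : key = "4t"
  · subst h23; decide
  by_cases h24 : key = "4eq"
  · subst h24; decide
  by_cases h25 : key = "hg"
  · subst h25; decide
  by_cases h26 : key = "hf"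
  · subst h26; decide
  by_cases h27 : key = "hq"
  · subst h27; decide
  by_cases h28 : key = "ht"
  · subst h28; decide
  by_cases h29 : key = "heq"
  · subst h29; decide
  have hA : aBandLoopStd key stdBandLabels = none := by
    simp [aBandLoopStd, aSfxLoop, suffixMapA, stdBandLabels, h0, h1, h2, h3, h4, h5, h6, h7, h8, h9, h10, h11, h12, h13, h14, h15, h16, h17, h18, h19, h20, h21, h22, h23, h24, h25, h26, h27, h28, h29]
  have geq : PySem.Str.endswith key "eq" = true → (PySem.Dict.mk stdBandLabels).get? (PySem.Str.slice key none (some (-(("eq" : String).length : Int)))) = none := by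
    intro he
    have hd := endswith_decomp key "eq" (by decide) he
    apply get?_none_stdBandLabels
    · intro hp; exact h4 (by rw [hd, ← hp]; decide)
    · intro hp; exact h9 (by rw [hd, ← hp]; decide)
    · intro hp; exact h14 (by rw [hd, ← hp]; decide)
    · intro hp; exact h19 (by rw [hd, ← hp]; decide)
    · intro hp; exact h24 (by rw [hd, ← hp]; decide)
    · intro hp; exact h29 (by rw [hd, ← hp]; decide)
  have gg : PySem.Str.endswith key "g" = true → (PySem.Dict.mk stdBandLabels).get? (PySem.Str.slice key none (some (-(("g" : String).length : Int)))) = none := by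
    intro he
    have hd := endswith_decomp key "g" (by decide) he
    apply get?_none_stdBandLabels
    · intro hp; exact h0 (by rw [hd, ← hp]; decide)
    · intro hp; exact h5 (by rw [hd, ← hp]; decide)
    · intro hp; exact h10 (by rw [hd, ← hp]; decide)
    · intro hp; exact h15 (by rw [hd, ← hp]; decide)
    · intro hp; exact h20 (by rw [hd, ← hp]; decide)
    · intro hp; exact h25 (by rw [hd, ← hp]; decide)
  have gf : PySem.Str.endswith key "f" = true → (PySem.Dict.mk stdBandLabels).get? (PySem.Str.slice key none (some (-(("f" : String).length : Int)))) = none := by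
    intro he
    have hd := endswith_decomp key "f" (by decide) he
    apply get?_none_stdBandLabels
    · intro hp; exact h1 (by rw [hd, ← hp]; decide)
    · intro hp; exact h6 (by rw [hd, ← hp]; decide)
    · intro hp; exact h11 (by rw [hd, ← hp]; decide)
    · intro hp; exact h16 (by rw [hd, ← hp]; decide)
    · intro hp; exact h21 (by rw [hd, ← hp]; decide)
    · intro hp; exact h26 (by rw [hd, ← hp]; decide)
  have gq : PySem.Str.endswith key "q" = true → (PySem.Dict.mk stdBandLabels).get? (PySem.Str.slice key none (some (-(("q" : String).length : Int)))) = none := by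
    intro he
    have hd := endswith_decomp key "q" (by decide) he
    apply get?_none_stdBandLabels
    · intro hp; exact h2 (by rw [hd, ← hp]; decide)
    · intro hp; exact h7 (by rw [hd, ← hp]; decide)
    · intro hp; exact h12 (by rw [hd, ← hp]; decide)
    · intro hp; exact h17 (by rw [hd, ← hp]; decide)
    · intro hp; exact h22 (by rw [hd, ← hp]; decide)
    · intro hp; exact h27 (by rw [hd, ← hp]; decide)
  have gt : PySem.Str.endswith key "t" = true → (PySem.Dict.mk stdBandLabels).get? (PySem.Str.slice key none (some (-(("t" : String).length : Int)))) = none := by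
    intro he
    have hd := endswith_decomp key "t" (by decide) he
    apply get?_none_stdBandLabels
    · intro hp; exact h3 (by rw [hd, ← hp]; decide)
    · intro hp; exact h8 (by rw [hd, ← hp]; decide)
    · intro hp; exact h13 (by rw [hd, ← hp]; decide)
    · intro hp; exact h18 (by rw [hd, ← hp]; decide)
    · intro hp; exact h23 (by rw [hd, ← hp]; decide)
    · intro hp; exact h28 (by rw [hd, ← hp]; decide)
  have hB : bLoop key (PySem.Dict.mk stdBandLabels) suffixLabelsB = none := (bLoop_skip geq).trans ((bLoop_skip gg).trans ((bLoop_skip gf).trans ((bLoop_skip gq).trans ((bLoop_skip gt).trans (rfl)))))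
  rw [hA, hB]

lemma main4 (key : String) :
    aBandLoop4 key fourBandLabels = bLoop key (PySem.Dict.mk fourBandLabels) suffixLabelsB := by
  by_cases h0 : key = "lg"
  · subst h0; decide
  by_cases h1 : key = "lf"
  · subst h1; decide
  by_cases h2 : key = "lq"
  · subst h2; decide
  by_cases h3 : key = "lt"
  · subst h3; decide
  by_cases h4 : key = "leq"
  · subst h4; decide
  by_cases h5 : key = "lmg"
  · subst h5; decide
  by_cases h6 : key = "lmf"
  · subst h6; decide
  by_cases h7 : key = "lmq"
  · subst h7; decide
  by_cases h8 : key = "lmt"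
  · subst h8; decide
  by_cases h9 : key = "lmeq"
  · subst h9; decide
  by_cases h10 : key = "hmg"
  · subst h10; decide
  by_cases h11 : key = "hmf"
  · subst h11; decide
  by_cases h12 : key = "hmq"
  · subst h12; decide
  by_cases h13 : key = "hmt"
  · subst h13; decide
  by_cases h14 : key = "hmeq"
  · subst h14; decide
  by_cases h15 : key = "hg"
  · subst h15; decide
  by_cases h16 : key = "hf"
  · subst h16; decide
  by_cases h17 : key = "hq"
  · subst h17; decide
  by_cases h18 : key = "ht"
  · subst h18; decide
  by_cases h19 : key = "heq"
  · subst h19; decide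
  have hA : aBandLoop4 key fourBandLabels = none := by
    simp [aBandLoop4, aSfxLoop, suffixMapA, fourBandLabels, h0, h1, h2, h3, h4, h5, h6, h7, h8, h9, h10, h11, h12, h13, h14, h15, h16, h17, h18, h19]
  have geq : PySem.Str.endswith key "eq" = true → (PySem.Dict.mk fourBandLabels).get? (PySem.Str.slice key none (some (-(("eq" : String).length : Int)))) = none := by
    intro he
    have hd := endswith_decomp key "eq" (by decide) he
    apply get?_none_fourBandLabels
    · intro hp; exact h4 (by rw [hd, ← hp]; decide)
    · intro hp; exact h9 (by rw [hd, ← hp]; decide)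
    · intro hp; exact h14 (by rw [hd, ← hp]; decide)
    · intro hp; exact h19 (by rw [hd, ← hp]; decide)
  have gg : PySem.Str.endswith key "g" = true → (PySem.Dict.mk fourBandLabels).get? (PySem.Str.slice key none (some (-(("g" : String).length : Int)))) = none := by
    intro he
    have hd := endswith_decomp key "g" (by decide) he
    apply get?_none_fourBandLabels
    · intro hp; exact h0 (by rw [hd, ← hp]; decide)
    · intro hp; exact h5 (by rw [hd, ← hp]; decide)
    · intro hp; exact h10 (by rw [hd, ← hp]; decide)
    · intro hp; exact h15 (by rw [hd, ← hp]; decide)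
  have gf : PySem.Str.endswith key "f" = true → (PySem.Dict.mk fourBandLabels).get? (PySem.Str.slice key none (some (-(("f" : String).length : Int)))) = none := by
    intro he
    have hd := endswith_decomp key "f" (by decide) he
    apply get?_none_fourBandLabels
    · intro hp; exact h1 (by rw [hd, ← hp]; decide)
    · intro hp; exact h6 (by rw [hd, ← hp]; decide)
    · intro hp; exact h11 (by rw [hd, ← hp]; decide)
    · intro hp; exact h16 (by rw [hd, ← hp]; decide)
  have gq : PySem.Str.endswith key "q" = true → (PySem.Dict.mk fourBandLabels).get? (PySem.Str.slice key none (some (-(("q" : String).length : Int)))) = none := by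
    intro he
    have hd := endswith_decomp key "q" (by decide) he
    apply get?_none_fourBandLabels
    · intro hp; exact h2 (by rw [hd, ← hp]; decide)
    · intro hp; exact h7 (by rw [hd, ← hp]; decide)
    · intro hp; exact h12 (by rw [hd, ← hp]; decide)
    · intro hp; exact h17 (by rw [hd, ← hp]; decide)
  have gt : PySem.Str.endswith key "t" = true → (PySem.Dict.mk fourBandLabels).get? (PySem.Str.slice key none (some (-(("t" : String).length : Int)))) = none := by
    intro he
    have hd := endswith_decomp key "t" (by decide) he
    apply get?_none_fourBandLabels
    · intro hp; exact h3 (by rw [hd, ← hp]; decide)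
    · intro hp; exact h8 (by rw [hd, ← hp]; decide)
    · intro hp; exact h13 (by rw [hd, ← hp]; decide)
    · intro hp; exact h18 (by rw [hd, ← hp]; decide)
  have hB : bLoop key (PySem.Dict.mk fourBandLabels) suffixLabelsB = none := (bLoop_skip geq).trans ((bLoop_skip gg).trans ((bLoop_skip gf).trans ((bLoop_skip gq).trans ((bLoop_skip gt).trans (rfl)))))
  rw [hA, hB]

-- ===== VERDICT (by name: the statement is the Claim_ definition above) =====
theorem eq_label_py_spec : Claim_equal_eq_label_py := by
  intro key model _
  unfold Spec_eq_label_py eq_label_py eq_label_py_alt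
  by_cases hp : model = "PULSAR"
  · simp [hp]
  · simp only [hp, if_false]
    by_cases h4 : model = "SOUL" ∨ model = "E88"
    · simp only [h4, if_true]
      rw [dictMk_four, main4 key]
    · simp only [h4, if_false]
      rw [dictMk_std, mainStd key]
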